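-- pv_equiv track=rewrite | github.com/nadxelleHernandez/algorithm_practice | algorithm_practice/dynamic_programming.py | newman_conway
-- ===== SOURCE A (Python) =====
-- def newman_conway(n):
--     if n <= 0:
--         return None
--
--     if n <= 2:
--         return 1
--
--     memo = [None,1,1]
--
--     #P(n) = P(P(n - 1)) + P(n - P(n - 1))
--     for i in range(3,n+1):
--         newman_for_i = memo[memo[i-1]] + memo[i-memo[i-1]]
--         memo.append(newman_for_i)
--
--     return memo[n]
-- ===== SOURCE B (Python) =====
-- def newman_conway(n):
--     if n <= 0:
--         return None
--     memo = [None] * (n + 1)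
--
--     def val(j):
--         if j <= 2:
--             return 1
--         return memo[j]
--
--     stack = [n]
--     while stack:
--         j = stack[-1]
--         if val(j) is not None:
--             stack.pop()
--             continue
--         p = val(j - 1)
--         if p is None:
--             stack.append(j - 1)
--             continue
--         a = val(p)
--         if a is None:
--             stack.append(p)
--             continue
--         b = val(j - p)
--         if b is None:
--             stack.append(j - p)
--             continue
--         memo[j] = a + b
--         stack.pop()
--     return val(n)
-- ===== Notes on version B (the rewrite author's own statement) =====
-- stated objective: alternative
-- what changed: A fills a memo array bottom-up (append nc(i) for i=3..n, then index memo[n]); B resolves n top-down by demand-driven memoization: an explicit work stack pushes uncached dependencies P(i-1), P(p), P(i-p) and a dict cache records each value once.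
import Mathlib
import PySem

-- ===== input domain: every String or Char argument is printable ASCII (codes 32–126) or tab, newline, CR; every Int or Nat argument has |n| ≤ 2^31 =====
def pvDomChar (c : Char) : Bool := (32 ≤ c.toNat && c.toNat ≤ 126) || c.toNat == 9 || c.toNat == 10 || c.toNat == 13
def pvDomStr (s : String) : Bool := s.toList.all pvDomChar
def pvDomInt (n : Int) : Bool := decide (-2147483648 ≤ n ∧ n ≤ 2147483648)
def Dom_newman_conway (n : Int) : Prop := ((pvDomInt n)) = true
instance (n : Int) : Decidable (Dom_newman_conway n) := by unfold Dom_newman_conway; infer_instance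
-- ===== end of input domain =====

-- B replaces A's bottom-up memo-array loop by demand-driven top-down memoization
-- (explicit work stack + dict cache); alternative decomposition, same cost.

-- ===== PORT A =====
-- A's memo starts as [None, 1, 1]; index 0 (Python None) is never read on any executed
-- path (all indices used are ≥ 1), so that slot is ported as the integer 0.
def stepA (memo : List Int) (i : Int) : List Int :=
  let newman_for_i := PySem.List.pyGetD memo (PySem.List.pyGetD memo (i-1) 0) 0
    + PySem.List.pyGetD memo (i - PySem.List.pyGetD memo (i-1) 0) 0
  memo ++ [newman_for_i]

def newman_conway (n : Int) : Option Int :=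
  if n ≤ 0 then none
  else if n ≤ 2 then some 1
  else
    let memo := (PySem.List.pyRange 3 (n+1) 1).foldl stepA [0, 1, 1]
    PySem.List.pyGet? memo n

-- ===== PORT B =====
-- transliteration of Source B: memo = [None]*(n+1), val(j), and the while-loop over the
-- work stack (list head = Python's stack top, stack[-1]); the fuel argument only makes
-- the loop structural — fuel 5^(n.toNat+1) provably suffices (lemma `resolve` below).
-- memo[j] is read/written only at 3 ≤ j < len(memo) (proved in lemma `resolve`),
-- where mRead/pySetD coincide with Python's memo[j] read/assignment.
def mRead (memo : Array (Option Int)) (x : Int) : Option Int := (memo[x.toNat]?).getD none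

def valB (memo : Array (Option Int)) (j : Int) : Option Int :=
  if j ≤ 2 then some 1
  else mRead memo j

def loopB (fuel : Nat) (stack : List Int) (memo : Array (Option Int)) : Array (Option Int) :=
  match fuel, stack with
  | _, [] => memo
  | 0, _ => memo          -- fuel exhaustion: never reached with the fuel used below
  | f + 1, j :: rest =>
    match valB memo j with
    | some _ => loopB f rest memo
    | none =>
      match valB memo (j - 1) with
      | none => loopB f ((j - 1) :: j :: rest) memo
      | some p =>
        match valB memo p with
        | none => loopB f (p :: j :: rest) memo
        | some a =>
          match valB memo (j - p) with
          | none => loopB f ((j - p) :: j :: rest) memo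
          | some b => loopB f rest (memo.setIfInBounds j.toNat (some (a + b)))

def newman_conway_alt (n : Int) : Option Int :=
  if n ≤ 0 then none
  else valB (loopB (5 ^ (n.toNat + 1)) [n] (Array.replicate (n + 1).toNat none)) n

-- ===== PRECONDITION & SPEC =====
def Spec_newman_conway (n : Int) (out : Option Int) : Prop := out = newman_conway_alt n
instance (n : Int) (out : Option Int) : Decidable (Spec_newman_conway n out) := by unfold Spec_newman_conway; infer_instance

-- ===== CLAIM (what is proved, stated in full; the proofs are below) =====
def Claim_equal_newman_conway : Prop := ∀ (n : Int), Dom_newman_conway n → Spec_newman_conway n (newman_conway n)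

-- ===== LEMMAS AND PROOFS =====

-- fuel-indexed reference version of the Newman–Conway recursion
def ncF : Nat → Int → Int
  | 0, _ => 0
  | f + 1, i => if i ≤ 2 then 1 else ncF f (ncF f (i-1)) + ncF f (i - ncF f (i-1))

-- the mathematical Newman–Conway value
def nc (i : Int) : Int := ncF i.toNat i

theorem ncF_bound : ∀ (f : Nat) (i : Int), 1 ≤ i → i ≤ f → 1 ≤ ncF f i ∧ ncF f i ≤ i := by
  intro f
  induction f with
  | zero => intro i h1 h2; omega
  | succ f ih =>
    intro i h1 h2
    by_cases h3 : i ≤ 2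
    · simp [ncF, h3]; omega
    · have hb1 := ih (i-1) (by omega) (by omega)
      have hb2 := ih (ncF f (i-1)) (by omega) (by omega)
      have hb3 := ih (i - ncF f (i-1)) (by omega) (by omega)
      simp [ncF, h3]
      omega

theorem ncF_stable : ∀ (f1 f2 : Nat) (i : Int), 1 ≤ i → i ≤ f1 → i ≤ f2 → ncF f1 i = ncF f2 i := by
  intro f1
  induction f1 with
  | zero => intro f2 i h1 h2 _; omega
  | succ f ih =>
    intro f2 i h1 h2 h3
    obtain ⟨g, rfl⟩ : ∃ g, f2 = g + 1 := ⟨f2 - 1, by omega⟩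
    by_cases hle : i ≤ 2
    · simp [ncF, hle]
    · have e1 : ncF f (i-1) = ncF g (i-1) := ih g (i-1) (by omega) (by omega) (by omega)
      have hb := ncF_bound f (i-1) (by omega) (by omega)
      have e2 : ncF f (ncF f (i-1)) = ncF g (ncF f (i-1)) :=
        ih g (ncF f (i-1)) (by omega) (by omega) (by omega)
      have e3 : ncF f (i - ncF f (i-1)) = ncF g (i - ncF f (i-1)) :=
        ih g (i - ncF f (i-1)) (by omega) (by omega) (by omega)
      simp only [ncF, if_neg hle]
      rw [← e1, ← e2, ← e3]

theorem ncF_eq_nc (f : Nat) (i : Int) (h1 : 1 ≤ i) (h2 : i ≤ f) : ncF f i = nc i :=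
  ncF_stable f i.toNat i h1 h2 (by omega)

theorem nc_bound (i : Int) (h : 1 ≤ i) : 1 ≤ nc i ∧ nc i ≤ i :=
  ncF_bound i.toNat i h (by omega)

theorem nc_base (i : Int) (h1 : 1 ≤ i) (h2 : i ≤ 2) : nc i = 1 := by
  obtain ⟨k, hk⟩ : ∃ k, i.toNat = k + 1 := ⟨i.toNat - 1, by omega⟩
  rw [nc, hk]
  simp [ncF, h2]

theorem nc_rec (i : Int) (h : 3 ≤ i) : nc i = nc (nc (i-1)) + nc (i - nc (i-1)) := by
  obtain ⟨k, hk⟩ : ∃ k, i.toNat = k + 1 := ⟨i.toNat - 1, by omega⟩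
  have hki : (k : Int) + 1 = i := by omega
  have e1 : ncF k (i-1) = nc (i-1) := ncF_eq_nc k (i-1) (by omega) (by omega)
  have hb := nc_bound (i-1) (by omega)
  have e2 : ncF k (nc (i-1)) = nc (nc (i-1)) := ncF_eq_nc _ _ (by omega) (by omega)
  have e3 : ncF k (i - nc (i-1)) = nc (i - nc (i-1)) := ncF_eq_nc _ _ (by omega) (by omega)
  have : nc i = ncF (k+1) i := by rw [nc, hk]
  rw [this]
  simp only [ncF, if_neg (by omega : ¬ i ≤ 2)]
  rw [e1, e2, e3]

-- indexing helpers for A's append-only memo list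
theorem pyGetD_append_lt (L : List Int) (x : Int) (k : Int) (h0 : 0 ≤ k) (h : k < L.length) :
    PySem.List.pyGetD (L ++ [x]) k 0 = PySem.List.pyGetD L k 0 := by
  rw [PySem.List.pyGetD_eq_getElem (L ++ [x]) 0 h0 (by simp; omega),
      PySem.List.pyGetD_eq_getElem L 0 h0 (by omega)]
  rw [List.getElem_append_left (by omega)]

theorem pyGetD_concat_len (L : List Int) (x : Int) (k : Int) (h : k = L.length) :
    PySem.List.pyGetD (L ++ [x]) k 0 = x := by
  rw [PySem.List.pyGetD_eq_getElem (L ++ [x]) 0 (by omega) (by simp; omega)]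
  have : k.toNat = L.length := by omega
  simp [this]

-- A's loop invariant: after processing range(3, j+1), memo has length j+1 and holds nc k at every 1 ≤ k ≤ j
theorem A_loop (j : Int) (hj : 2 ≤ j) :
    ((List.foldl stepA [0, 1, 1] (PySem.List.pyRange 3 (j+1) 1)).length : Int) = j + 1 ∧
    ∀ k : Int, 1 ≤ k → k ≤ j →
      PySem.List.pyGetD (List.foldl stepA [0, 1, 1] (PySem.List.pyRange 3 (j+1) 1)) k 0 = nc k := by
  induction j, hj using Int.le_induction with
  | base =>
    rw [PySem.List.pyRange_one_eq_nil (by omega)]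
    constructor
    · simp
    · intro k h1 h2
      interval_cases k
      · simpa using (nc_base 1 (by omega) (by omega)).symm
      · simpa [PySem.List.pyGetD] using (nc_base 2 (by omega) (by omega)).symm
  | succ j hj ih =>
    obtain ⟨hlen, hval⟩ := ih
    rw [show j + 1 + 1 = (j + 1) + 1 by ring,
        PySem.List.pyRange_one_succ_right (by omega), List.foldl_append]
    set L := List.foldl stepA [0, 1, 1] (PySem.List.pyRange 3 (j+1) 1) with hL
    simp only [List.foldl_cons, List.foldl_nil]
    have hbj := nc_bound j (by omega)
    have hgj : PySem.List.pyGetD L (j + 1 - 1) 0 = nc j := by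
      rw [show j + 1 - 1 = j by ring]; exact hval j (by omega) (by omega)
    have hstep : stepA L (j+1) = L ++ [nc (j+1)] := by
      unfold stepA
      have hr : nc (j+1) = nc (nc j) + nc (j + 1 - nc j) := by
        have h := nc_rec (j+1) (by omega)
        rw [show j + 1 - 1 = j by ring] at h
        exact h
      rw [hgj, hval (nc j) (by omega) (by omega),
          hval (j + 1 - nc j) (by omega) (by omega), ← hr]
    rw [hstep]
    constructor
    · simp; omega
    · intro k h1 h2
      by_cases hk : k ≤ j
      · rw [pyGetD_append_lt L _ k (by omega) (by omega)]
        exact hval k h1 hk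
      · have : k = j + 1 := by omega
        rw [this, pyGetD_concat_len L _ _ (by omega)]

-- ===== B-side lemmas: the stack machine resolves its top element =====

theorem mRead_set (xs : Array (Option Int)) (j x : Int) (v : Option Int)
    (h0 : 0 ≤ j) (hj : j < (xs.size : Int)) (hx : 0 ≤ x) :
    mRead (xs.setIfInBounds j.toNat v) x = if x = j then v else mRead xs x := by
  unfold mRead
  rw [Array.getElem?_setIfInBounds]
  by_cases e : x = j
  · rw [if_pos (by omega), if_pos (by omega), if_pos e]
    rfl
  · rw [if_neg (by omega), if_neg e]

theorem mRead_replicate_none (m : Nat) (x : Int) :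
    mRead (Array.replicate m (none : Option Int)) x = none := by
  unfold mRead
  rw [Array.getElem?_replicate]
  by_cases h : x.toNat < m
  · rw [if_pos h]
    rfl
  · rw [if_neg h]
    rfl

-- every value the memo holds is the corresponding Newman–Conway value
def MemOK (c : Array (Option Int)) : Prop :=
  ∀ x v, 1 ≤ x → mRead c x = some v → v = nc x

-- c' keeps every value c already holds (at the indices the loop uses)
def CExt (c c' : Array (Option Int)) : Prop :=
  ∀ x v, 1 ≤ x → mRead c x = some v → mRead c' x = some v

theorem valB_sound (c : Array (Option Int)) (j v : Int) (hok : MemOK c) (h1 : 1 ≤ j)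
    (h : valB c j = some v) : v = nc j := by
  unfold valB at h
  split at h
  · injection h with h
    subst h
    exact (nc_base j h1 (by omega)).symm
  · exact hok j v h1 h

theorem valB_mono (c c' : Array (Option Int)) (x v : Int) (hext : CExt c c') (hx : 1 ≤ x)
    (h : valB c x = some v) : valB c' x = some v := by
  unfold valB at h ⊢
  by_cases h2 : x ≤ 2
  · rwa [if_pos h2] at h ⊢
  · rw [if_neg h2] at h ⊢
    exact hext x v hx h

theorem loopB_nil (f : Nat) (c : Array (Option Int)) : loopB f [] c = c := by
  cases f <;> rfl

-- one unfolding step of the while-loop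
theorem loopB_succ (f : Nat) (j : Int) (rest : List Int) (c : Array (Option Int)) :
    loopB (f + 1) (j :: rest) c =
      match valB c j with
      | some _ => loopB f rest c
      | none =>
        match valB c (j - 1) with
        | none => loopB f ((j - 1) :: j :: rest) c
        | some p =>
          match valB c p with
          | none => loopB f (p :: j :: rest) c
          | some a =>
            match valB c (j - p) with
            | none => loopB f ((j - p) :: j :: rest) c
            | some b => loopB f rest (c.setIfInBounds j.toNat (some (a + b))) := rfl

-- Main lemma: with a sound memo, the loop pops a top element j within 2·5^j.toNat
-- iterations, leaving a sound memo of the same length that knows nc j and whose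
-- entries changed only at indices ≤ j.
theorem resolve : ∀ (m : Nat) (j : Int) (c : Array (Option Int)),
    j.toNat ≤ m → 1 ≤ j → j < (c.size : Int) → MemOK c →
    ∃ (c' : Array (Option Int)) (k : Nat), k ≤ 2 * 5 ^ j.toNat ∧
      (∀ (g : Nat) (rest : List Int), loopB (g + k) (j :: rest) c = loopB g rest c') ∧
      c'.size = c.size ∧ MemOK c' ∧ CExt c c' ∧
      (∀ x, 1 ≤ x → mRead c' x ≠ mRead c x → x ≤ j) ∧
      valB c' j = some (nc j) := by
  intro m
  induction m with
  | zero => intro j c hm h1 _ _; omega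
  | succ m ih =>
    intro j c hm h1 hlen hok
    cases hv : valB c j with
    | some v =>
      have h5 : 1 ≤ 5 ^ j.toNat := Nat.one_le_pow _ _ (by omega)
      refine ⟨c, 1, by omega, ?_, rfl, hok, fun _ _ _ h => h, fun x _ hx => absurd rfl hx, ?_⟩
      · intro g rest
        rw [loopB_succ, hv]
      · rw [hv, valB_sound c j v hok h1 hv]
    | none =>
      have hj3 : 3 ≤ j := by
        by_contra hc
        unfold valB at hv
        rw [if_pos (by omega)] at hv
        simp at hv
      have hjnone : mRead c j = none := by
        unfold valB at hv
        rwa [if_neg (by omega)] at hv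
      have hbp := nc_bound (j-1) (by omega)
      -- Stage A: ensure nc (j-1) is known
      obtain ⟨c1, kA, hkA, hrunA, hlen1, hok1, hext1, hbdd1, hval1⟩ :
          ∃ c1 kA, kA ≤ 1 + 2 * 5 ^ (j-1).toNat ∧
            (∀ g rest, loopB (g + kA) (j :: rest) c = loopB g (j :: rest) c1) ∧
            c1.size = c.size ∧ MemOK c1 ∧ CExt c c1 ∧
            (∀ x, 1 ≤ x → mRead c1 x ≠ mRead c x → x ≤ j - 1) ∧
            valB c1 (j-1) = some (nc (j-1)) := by
        cases hp : valB c (j-1) with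
        | some p =>
          exact ⟨c, 0, by omega, fun g rest => rfl, rfl, hok, fun _ _ _ h => h,
            fun x _ hx => absurd rfl hx, by rw [hp, valB_sound c (j-1) p hok (by omega) hp]⟩
        | none =>
          obtain ⟨c1, k1, hk1, hrun1, hlen1, hok1, hext1, hbdd1, hval1⟩ :=
            ih (j-1) c (by omega) (by omega) (by omega) hok
          refine ⟨c1, k1 + 1, by omega, ?_, hlen1, hok1, hext1, hbdd1, hval1⟩
          intro g rest
          show loopB ((g + k1) + 1) (j :: rest) c = loopB g (j :: rest) c1
          simp only [loopB_succ, hv, hp]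
          exact hrun1 g (j :: rest)
      have hc1j : valB c1 j = none := by
        unfold valB
        rw [if_neg (by omega)]
        cases e : mRead c1 j with
        | none => rfl
        | some w =>
          have : mRead c1 j ≠ mRead c j := by
            rw [e, hjnone]; simp
          have := hbdd1 j (by omega) this
          omega
      -- Stage B: ensure nc (nc (j-1)) is known
      obtain ⟨c2, kB, hkB, hrunB, hlen2, hok2, hext2, hbdd2, hval2⟩ :
          ∃ c2 kB, kB ≤ 1 + 2 * 5 ^ (j-1).toNat ∧
            (∀ g rest, loopB (g + kB) (j :: rest) c1 = loopB g (j :: rest) c2) ∧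
            c2.size = c1.size ∧ MemOK c2 ∧ CExt c1 c2 ∧
            (∀ x, 1 ≤ x → mRead c2 x ≠ mRead c1 x → x ≤ j - 1) ∧
            valB c2 (nc (j-1)) = some (nc (nc (j-1))) := by
        cases ha : valB c1 (nc (j-1)) with
        | some a =>
          exact ⟨c1, 0, by omega, fun g rest => rfl, rfl, hok1, fun _ _ _ h => h,
            fun x _ hx => absurd rfl hx, by rw [ha, valB_sound c1 (nc (j-1)) a hok1 (by omega) ha]⟩
        | none =>
          obtain ⟨c2, k2, hk2, hrun2, hlen2, hok2, hext2, hbdd2, hval2⟩ :=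
            ih (nc (j-1)) c1 (by omega) (by omega) (by omega) hok1
          have hmono : 5 ^ (nc (j-1)).toNat ≤ 5 ^ (j-1).toNat :=
            Nat.pow_le_pow_right (by omega) (by omega)
          refine ⟨c2, k2 + 1, by omega, ?_, hlen2, hok2, hext2,
            fun x hx1 hx => by have := hbdd2 x hx1 hx; omega, hval2⟩
          intro g rest
          show loopB ((g + k2) + 1) (j :: rest) c1 = loopB g (j :: rest) c2
          simp only [loopB_succ, hc1j, hval1, ha]
          exact hrun2 g (j :: rest)
      have hc2j : valB c2 j = none := by
        unfold valB
        rw [if_neg (by omega)]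
        cases e : mRead c2 j with
        | none => rfl
        | some w =>
          have hne : mRead c2 j ≠ mRead c1 j := by
            intro h
            rw [e] at h
            have : mRead c1 j ≠ mRead c j := by
              rw [← h, hjnone]; simp
            have := hbdd1 j (by omega) this
            omega
          have := hbdd2 j (by omega) hne
          omega
      have hval1' : valB c2 (j-1) = some (nc (j-1)) := valB_mono c1 c2 _ _ hext2 (by omega) hval1
      -- Stage C: ensure nc (j - nc (j-1)) is known
      obtain ⟨c3, kC, hkC, hrunC, hlen3, hok3, hext3, hbdd3, hval3⟩ :
          ∃ c3 kC, kC ≤ 1 + 2 * 5 ^ (j-1).toNat ∧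
            (∀ g rest, loopB (g + kC) (j :: rest) c2 = loopB g (j :: rest) c3) ∧
            c3.size = c2.size ∧ MemOK c3 ∧ CExt c2 c3 ∧
            (∀ x, 1 ≤ x → mRead c3 x ≠ mRead c2 x → x ≤ j - 1) ∧
            valB c3 (j - nc (j-1)) = some (nc (j - nc (j-1))) := by
        cases hb : valB c2 (j - nc (j-1)) with
        | some b =>
          exact ⟨c2, 0, by omega, fun g rest => rfl, rfl, hok2, fun _ _ _ h => h,
            fun x _ hx => absurd rfl hx, by rw [hb, valB_sound c2 (j - nc (j-1)) b hok2 (by omega) hb]⟩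
        | none =>
          obtain ⟨c3, k3, hk3, hrun3, hlen3, hok3, hext3, hbdd3, hval3⟩ :=
            ih (j - nc (j-1)) c2 (by omega) (by omega) (by omega) hok2
          have hmono : 5 ^ (j - nc (j-1)).toNat ≤ 5 ^ (j-1).toNat :=
            Nat.pow_le_pow_right (by omega) (by omega)
          refine ⟨c3, k3 + 1, by omega, ?_, hlen3, hok3, hext3,
            fun x hx1 hx => by have := hbdd3 x hx1 hx; omega, hval3⟩
          intro g rest
          show loopB ((g + k3) + 1) (j :: rest) c2 = loopB g (j :: rest) c3
          simp only [loopB_succ, hc2j, hval1', hval2, hb]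
          exact hrun3 g (j :: rest)
      have hc3j : valB c3 j = none := by
        unfold valB
        rw [if_neg (by omega)]
        cases e : mRead c3 j with
        | none => rfl
        | some w =>
          have hne3 : mRead c3 j ≠ mRead c2 j := by
            intro h
            rw [e] at h
            have hne2 : mRead c2 j ≠ mRead c1 j := by
              intro h'
              rw [← h] at h'
              have : mRead c1 j ≠ mRead c j := by
                rw [← h', hjnone]; simp
              have := hbdd1 j (by omega) this
              omega
            have := hbdd2 j (by omega) hne2
            omega
          have := hbdd3 j (by omega) hne3
          omega
      have hval1'' : valB c3 (j-1) = some (nc (j-1)) := valB_mono c2 c3 _ _ hext3 (by omega) hval1'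
      have hval2' : valB c3 (nc (j-1)) = some (nc (nc (j-1))) := valB_mono c2 c3 _ _ hext3 (by omega) hval2
      have hjlen3 : j < (c3.size : Int) := by
        rw [hlen3, hlen2, hlen1]; omega
      -- final iteration: record nc j in the memo and pop j
      refine ⟨c3.setIfInBounds j.toNat (some (nc j)), kA + kB + kC + 1, ?_, ?_, ?_, ?_, ?_, ?_, ?_⟩
      · have h5 : 1 ≤ 5 ^ (j-1).toNat := Nat.one_le_pow _ _ (by omega)
        have hsucc : j.toNat = (j-1).toNat + 1 := by omega
        rw [hsucc, pow_succ]
        omega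
      · intro g rest
        calc loopB (g + (kA + kB + kC + 1)) (j :: rest) c
            = loopB ((g + 1 + kC + kB) + kA) (j :: rest) c := by congr 1; omega
          _ = loopB (g + 1 + kC + kB) (j :: rest) c1 := hrunA _ _
          _ = loopB (g + 1 + kC) (j :: rest) c2 := hrunB _ _
          _ = loopB (g + 1) (j :: rest) c3 := hrunC _ _
          _ = loopB g rest (c3.setIfInBounds j.toNat (some (nc j))) := by
              simp only [loopB_succ, hc3j, hval1'', hval2', hval3]
              rw [← nc_rec j hj3]
      · rw [Array.size_setIfInBounds, hlen3, hlen2, hlen1]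
      · intro x v hx1 h
        rw [mRead_set c3 j x _ (by omega) hjlen3 (by omega)] at h
        split at h
        · rename_i hxj
          subst hxj
          injection h with h
          exact h.symm
        · exact hok3 x v hx1 h
      · intro x v hx1 h
        have hxj : x ≠ j := by
          intro e
          rw [e, hjnone] at h
          simp at h
        rw [mRead_set c3 j x _ (by omega) hjlen3 (by omega), if_neg hxj]
        exact hext3 x v hx1 (hext2 x v hx1 (hext1 x v hx1 h))
      · intro x hx1 hx
        by_cases hxj : x = j
        · omega
        · rw [mRead_set c3 j x _ (by omega) hjlen3 (by omega), if_neg hxj] at hx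
          by_cases b3 : mRead c3 x = mRead c2 x
          · rw [b3] at hx
            by_cases b2 : mRead c2 x = mRead c1 x
            · rw [b2] at hx
              have := hbdd1 x hx1 hx
              omega
            · have := hbdd2 x hx1 b2
              omega
          · have := hbdd3 x hx1 b3
            omega
      · unfold valB
        rw [if_neg (by omega), mRead_set c3 j j _ (by omega) hjlen3 (by omega), if_pos rfl]

-- ===== VERDICT (by name: the statement is the Claim_ definition above) =====
theorem newman_conway_spec : Claim_equal_newman_conway := by
  intro n _
  unfold Spec_newman_conway newman_conway newman_conway_alt
  by_cases h0 : n ≤ 0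
  · simp [h0]
  · have hinit : MemOK (Array.replicate (n + 1).toNat (none : Option Int)) := by
      intro x v hx1 h
      rw [mRead_replicate_none] at h
      simp at h
    obtain ⟨c', k, hk, hrun, hlen', hok', hext, hbdd, hval⟩ :=
      resolve n.toNat n (Array.replicate (n + 1).toNat none) (le_refl _) (by omega)
        (by simp only [Array.size_replicate]; omega) hinit
    have hkf : k ≤ 5 ^ (n.toNat + 1) := by
      have h5 : 1 ≤ 5 ^ n.toNat := Nat.one_le_pow _ _ (by omega)
      have : 2 * 5 ^ n.toNat ≤ 5 ^ (n.toNat + 1) := by rw [pow_succ]; omega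
      omega
    have hB : loopB (5 ^ (n.toNat + 1)) [n] (Array.replicate (n + 1).toNat none) = c' := by
      rw [show 5 ^ (n.toNat + 1) = (5 ^ (n.toNat + 1) - k) + k by omega,
          hrun (5 ^ (n.toNat + 1) - k) [], loopB_nil]
    by_cases h2 : n ≤ 2
    · rw [if_neg h0, if_neg h0, if_pos h2, hB, hval, nc_base n (by omega) h2]
    · rw [if_neg h0, if_neg h0, if_neg h2, hB, hval]
      obtain ⟨hlen, hvalA⟩ := A_loop n (by omega)
      have hA := hvalA n (by omega) (by omega)
      set L := List.foldl stepA [0, 1, 1] (PySem.List.pyRange 3 (n+1) 1) with hL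
      rw [PySem.List.pyGet?_eq_some_getElem L (by omega) (by omega),
          ← PySem.List.pyGetD_eq_getElem L 0 (by omega) (by omega), hA]
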